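-- pv_equiv track=rewrite | github.com/Sathish8472/DSA-Problems | 1537-maximum-score-after-splitting-a-string/1537-maximum-score-after-splitting-a-string.py | maxScore_1
-- ===== SOURCE A (Python) =====
-- def maxScore_1(s: str) -> int:
--     max_score = 0
--
--     for i in range(len(s) - 1):
--         right = i + 1
--
--         zero_score = 0
--         ones_score = 0
--         left = 0
--         while left < right:
--             if s[left] == "0":
--                 zero_score += 1
--             left += 1
--
--         while right < len(s):
--             if s[right] == "1":
--                 ones_score += 1
--             right += 1
--
--         max_score = max(max_score, zero_score + ones_score)
--
--     return max_score
-- ===== SOURCE B (Python) =====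
-- def maxScore_1(s: str) -> int:
--     # One pass: keep running zero/one counts over the left part; right ones = total ones - left ones.
--     total_ones = s.count("1")
--     best = 0
--     zeros = 0
--     ones = 0
--     for c in s[:-1]:
--         if c == "0":
--             zeros += 1
--         if c == "1":
--             ones += 1
--         best = max(best, zeros + total_ones - ones)
--     return best
-- ===== Notes on version B (the rewrite author's own statement) =====
-- stated objective: faster
-- what changed: Replaced the per-split rescans of both halves (two inner while loops per split) by a single left-to-right pass keeping running zero/one counts and the precomputed total number of ones, so each split's score is O(1).
import Mathlib
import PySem

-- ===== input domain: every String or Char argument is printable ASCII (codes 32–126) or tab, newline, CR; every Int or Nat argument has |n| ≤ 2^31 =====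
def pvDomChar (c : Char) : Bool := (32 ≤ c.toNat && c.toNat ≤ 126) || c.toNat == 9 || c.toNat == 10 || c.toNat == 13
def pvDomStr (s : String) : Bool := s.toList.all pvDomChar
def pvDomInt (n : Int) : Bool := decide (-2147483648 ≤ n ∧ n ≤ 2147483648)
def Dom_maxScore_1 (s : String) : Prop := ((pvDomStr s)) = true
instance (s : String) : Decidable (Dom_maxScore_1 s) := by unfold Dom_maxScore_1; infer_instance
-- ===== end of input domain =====

-- B replaces A's per-split rescans of both halves by one left-to-right pass with running
-- zero/one counts and the precomputed total number of ones; the return values agree everywhere.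

-- ===== PORT A =====
-- A's two inner index while-loops ('left += 1' up to right, 'right += 1' up to len(s)) are
-- ported as folds over the index range they traverse; s[..] via pyGetD (exact: every index
-- A reads lies in 0 ≤ idx < len(s))
def maxScore_1 (s : String) : Int :=
  (PySem.List.pyRange 0 (PySem.Str.len s - 1) 1).foldl
    (fun max_score i =>
      let right := i + 1
      let zero_score := (PySem.List.pyRange 0 right 1).foldl
        (fun acc left => if PySem.List.pyGetD s.toList left ' ' = '0' then acc + 1 else acc) 0
      let ones_score := (PySem.List.pyRange right (PySem.Str.len s) 1).foldl
        (fun acc r => if PySem.List.pyGetD s.toList r ' ' = '1' then acc + 1 else acc) 0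
      max max_score (zero_score + ones_score)) 0

-- ===== PORT B =====
def maxScore_1_alt (s : String) : Int :=
  let total : Int := (PySem.Str.count s "1" : Int)
  (((PySem.Str.slice s none (some (-1))).toList).foldl
    (fun (st : Int × Int × Int) c =>
      let zeros := if c = '0' then st.2.1 + 1 else st.2.1
      let ones  := if c = '1' then st.2.2 + 1 else st.2.2
      (max st.1 (zeros + total - ones), zeros, ones))
    (0, 0, 0)).1

-- ===== PRECONDITION & SPEC =====
def Spec_maxScore_1 (s : String) (out : Int) : Prop := out = maxScore_1_alt s
instance (s : String) (out : Int) : Decidable (Spec_maxScore_1 s out) := by unfold Spec_maxScore_1; infer_instance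

-- ===== CLAIM (what is proved, stated in full; the proofs are below) =====
def Claim_equal_maxScore_1 : Prop := ∀ (s : String), Dom_maxScore_1 s → Spec_maxScore_1 s (maxScore_1 s)

-- ===== LEMMAS AND PROOFS =====

theorem countP_decide (l : List Char) (c : Char) :
    List.countP (fun x => decide (x = c)) l = l.count c := by
  rw [List.count]
  apply List.countP_congr
  intro x _
  simp

-- A's second inner loop counts '1' in cs[right:]
theorem ones_fold (cs : List Char) (right : Int) (hr : 0 ≤ right) :
    (PySem.List.pyRange right (cs.length : Int) 1).foldl
      (fun acc r => if PySem.List.pyGetD cs r ' ' = '1' then acc + 1 else acc) 0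
    = ((cs.drop right.toNat).count '1' : Int) := by
  have h := PySem.List.foldl_pyRange_pyGetD cs ' '
    (fun (acc : Int) (c : Char) => if c = '1' then acc + 1 else acc) 0 hr
  rw [show PySem.List.len cs = (cs.length : Int) from by simp] at h
  rw [h, PySem.List.foldl_ite_add_one, countP_decide]
  simp

-- A's first inner loop counts '0' in cs[:right]
theorem zeros_fold (cs : List Char) (right : Int) (hr : 0 ≤ right)
    (hle : right ≤ (cs.length : Int)) :
    (PySem.List.pyRange 0 right 1).foldl
      (fun acc l => if PySem.List.pyGetD cs l ' ' = '0' then acc + 1 else acc) 0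
    = ((cs.take right.toNat).count '0' : Int) := by
  have hlen : ((cs.take right.toNat).length : Int) = right := by
    simp [List.length_take]; omega
  have hcongr : ∀ (acc : Int) (l : Int), l ∈ PySem.List.pyRange 0 right 1 →
      (if PySem.List.pyGetD cs l ' ' = '0' then acc + 1 else acc)
      = (if PySem.List.pyGetD (cs.take right.toNat) l ' ' = '0' then acc + 1 else acc) := by
    intro acc l hl
    rw [PySem.List.mem_pyRange_one] at hl
    have h1 := PySem.List.pyGetD_eq_getElem (xs := cs) (i := l) (d := ' ') hl.1 (by omega)
    have h2 := PySem.List.pyGetD_eq_getElem (xs := cs.take right.toNat) (i := l) (d := ' ')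
      hl.1 (by omega)
    rw [h1, h2, List.getElem_take]
  rw [PySem.List.foldl_congr_mem _ _ _ _ hcongr]
  have h := PySem.List.foldl_pyRange_zero_pyGetD (cs.take right.toNat) ' '
    (fun (acc : Int) (c : Char) => if c = '0' then acc + 1 else acc) 0
  rw [show PySem.List.len (cs.take right.toNat) = right from by simpa using hlen] at h
  rw [h, PySem.List.foldl_ite_add_one, countP_decide]
  simp

-- Python's s.count("1") for the one-character needle is the character count of '1'
theorem count_go_single (v : Char) : ∀ (fuel : Nat) (l : List Char) (acc : Nat), l.length ≤ fuel →
    PySem.Chars.count.go [v] fuel l acc = acc + l.count v := by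
  intro fuel
  induction fuel with
  | zero =>
    intro l acc h
    have : l = [] := List.eq_nil_of_length_eq_zero (by omega)
    subst this; rfl
  | succ fuel ih =>
    intro l acc h
    cases l with
    | nil => rfl
    | cons c t =>
      rw [PySem.Chars.count.go]
      by_cases hv : v = c
      · rw [if_pos (by simp [List.isPrefixOf, hv])]
        simp only [List.length_singleton, List.drop_one, List.tail_cons]
        rw [ih t (acc + 1) (by simpa using h)]
        simp [hv]
        omega
      · rw [if_neg (by simp [List.isPrefixOf]; exact fun hh => hv (by simpa using hh))]
        rw [ih t acc (by simpa using h)]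
        simp [List.count_cons]
        intro hh; exact absurd hh.symm hv

theorem str_count_one (s : String) : (PySem.Str.count s "1" : Int) = (s.toList.count '1' : Int) := by
  have h : PySem.Str.count s "1" = PySem.Chars.count s.toList ['1'] := by
    simp [PySem.Str.count_eq]
  rw [h, PySem.Chars.count]
  simp only [List.isEmpty_cons, Bool.false_eq_true, if_false]
  rw [count_go_single '1' s.toList.length s.toList 0 le_rfl]
  simp

theorem count_drop_int (cs : List Char) (j : Nat) (v : Char) :
    ((cs.drop j).count v : Int) = (cs.count v : Int) - ((cs.take j).count v : Int) := by
  have h : (cs.take j).count v + (cs.drop j).count v = cs.count v := by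
    rw [← List.count_append, List.take_append_drop]
  omega

-- B's fold as a structural recursion (the score of each split, left to right)
def pvSpec (total : Int) : List Char → Int × Int × Int → Int
  | [], st => st.1
  | c :: t, st =>
      let zeros := if c = '0' then st.2.1 + 1 else st.2.1
      let ones  := if c = '1' then st.2.2 + 1 else st.2.2
      pvSpec total t (max st.1 (zeros + total - ones), zeros, ones)

theorem foldl_eq_pvSpec (total : Int) (t : List Char) (st : Int × Int × Int) :
    (t.foldl (fun (st : Int × Int × Int) c =>
      let zeros := if c = '0' then st.2.1 + 1 else st.2.1
      let ones  := if c = '1' then st.2.2 + 1 else st.2.2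
      (max st.1 (zeros + total - ones), zeros, ones)) st).1 = pvSpec total t st := by
  induction t generalizing st with
  | nil => rfl
  | cons c t ih => simp [List.foldl_cons, pvSpec, ih]

-- the common form: A's max-over-splits fold equals pvSpec, by induction on the suffix still to process
theorem range_foldl_eq_pvSpec (cs : List Char) (total : Int) :
    ∀ (t p r : List Char) (b : Int), cs = p ++ t ++ r →
    (List.range t.length).foldl
        (fun m k => max m (((cs.take (p.length + k + 1)).count '0' : Int) + total
                            - ((cs.take (p.length + k + 1)).count '1' : Int))) b
      = pvSpec total t (b, (p.count '0' : Int), (p.count '1' : Int)) := by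
  intro t
  induction t with
  | nil => intro p r b hcs; simp [pvSpec]
  | cons c t ih =>
    intro p r b hcs
    rw [List.length_cons, List.range_succ_eq_map, List.foldl_cons, List.foldl_map]
    have htake : cs.take (p.length + 0 + 1) = p ++ [c] := by
      rw [hcs]
      have : p ++ (c :: t) ++ r = (p ++ [c]) ++ (t ++ r) := by simp
      rw [this, List.take_left' (by simp)]
    have hstep : ∀ k : Nat, p.length + (k + 1) + 1 = (p ++ [c]).length + k + 1 := by
      intro k; simp; omega
    have hih := ih (p ++ [c]) r
      (max b (((p ++ [c]).count '0' : Int) + total - ((p ++ [c]).count '1' : Int)))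
      (by rw [hcs]; simp)
    simp only [htake] at *
    simp only [hstep]
    rw [hih]
    show _ = pvSpec total (c :: t) (b, (p.count '0' : Int), (p.count '1' : Int))
    rw [pvSpec]
    simp only [List.count_append, List.count_singleton]
    by_cases h0 : c = '0' <;> by_cases h1 : c = '1' <;> simp [h0, h1]

-- A's whole loop, on the list side, equals pvSpec over all but the last character
theorem A_list (cs : List Char) :
    (List.range ((cs.length : Int) - 1).toNat).foldl
      (fun m (k : Nat) => max m (
        ((PySem.List.pyRange 0 ((k : Int) + 1) 1).foldl
          (fun acc l => if PySem.List.pyGetD cs l ' ' = '0' then acc + 1 else acc) 0)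
        + ((PySem.List.pyRange ((k : Int) + 1) (cs.length : Int) 1).foldl
          (fun acc r => if PySem.List.pyGetD cs r ' ' = '1' then acc + 1 else acc) 0))) 0
    = pvSpec ((cs.count '1' : Nat) : Int) cs.dropLast (0, 0, 0) := by
  have hcount : ∀ (m : Int) (k : Nat), k ∈ List.range ((cs.length : Int) - 1).toNat →
      (fun m (k : Nat) => max m (
        ((PySem.List.pyRange 0 ((k : Int) + 1) 1).foldl
          (fun acc l => if PySem.List.pyGetD cs l ' ' = '0' then acc + 1 else acc) 0)
        + ((PySem.List.pyRange ((k : Int) + 1) (cs.length : Int) 1).foldl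
          (fun acc r => if PySem.List.pyGetD cs r ' ' = '1' then acc + 1 else acc) 0))) m k
      = (fun m (k : Nat) => max m (((cs.take (([] : List Char).length + k + 1)).count '0' : Int)
          + ((cs.count '1' : Nat) : Int)
          - ((cs.take (([] : List Char).length + k + 1)).count '1' : Int))) m k := by
    intro m k hk
    rw [List.mem_range] at hk
    dsimp only
    rw [zeros_fold cs ((k : Int) + 1) (by positivity) (by omega)]
    rw [ones_fold cs ((k : Int) + 1) (by positivity)]
    rw [show (((k : Int) + 1)).toNat = k + 1 from by omega]
    rw [count_drop_int]
    simp only [List.length_nil, Nat.zero_add]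
    ring_nf
  rw [PySem.List.foldl_congr_mem _ _ _ _ hcount]
  by_cases hnil : cs = []
  · subst hnil; simp [pvSpec]
  · have hsplit : cs = [] ++ cs.dropLast ++ [cs.getLast hnil] := by
      simp [List.dropLast_append_getLast hnil]
    have hlen : ((cs.length : Int) - 1).toNat = cs.dropLast.length := by
      rw [List.length_dropLast]; omega
    rw [hlen]
    have hG := range_foldl_eq_pvSpec cs ((cs.count '1' : Nat) : Int)
      cs.dropLast [] [cs.getLast hnil] 0 hsplit
    simpa using hG

theorem maxScore_1_eq_alt (s : String) : maxScore_1 s = maxScore_1_alt s := by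
  have hB : maxScore_1_alt s
      = pvSpec ((s.toList.count '1' : Nat) : Int) s.toList.dropLast (0, 0, 0) := by
    unfold maxScore_1_alt
    rw [str_count_one]
    rw [show (PySem.Str.slice s none (some (-1))).toList = s.toList.dropLast from
      PySem.Str.slice_to_neg_one s]
    exact foldl_eq_pvSpec _ _ _
  rw [hB, ← A_list s.toList]
  unfold maxScore_1
  rw [show PySem.Str.len s = (s.toList.length : Int) from by simp]
  rw [PySem.List.pyRange_one, List.foldl_map]
  simp only [sub_zero, zero_add]

-- ===== VERDICT (by name: the statement is the Claim_ definition above) =====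
theorem maxScore_1_spec : Claim_equal_maxScore_1 := by
  intro s _
  unfold Spec_maxScore_1
  exact maxScore_1_eq_alt s
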